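-- pv_equiv track=rewrite | github.com/lottepy/leetcode | codility/2-frog.py | solution
-- ===== SOURCE A (Python) =====
-- def solution(blocks):
--     # write your code in Python 3.6
--     res = []
--     for i in range(len(blocks)):
--         count = 1
--         if i == 0:
--             count += count_right(i, blocks)
--         elif i == len(blocks) - 1:
--             count += count_left(i, blocks)
--         else:
--             count += count_left(i, blocks)
--             count += count_right(i, blocks)
--         res.append(count)
--     return max(res)
--
-- def count_left(i, blocks):
--     if i - 1 >= 0 and blocks[i-1] >= blocks[i]:
--         return 1  + count_left(i-1, blocks)
--     else:
--         return 0
--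
-- def count_right(i, blocks):
--     if i+1 <= len(blocks)-1 and blocks[i+1] >= blocks[i]:
--         return 1  + count_right(i+1, blocks)
--     else:
--         return 0
-- ===== SOURCE B (Python) =====
-- def solution(blocks):
--     # O(n): one forward run-length pass for the left extents and the same
--     # pass on the reversed list for the right extents, then one max over zip.
--     def runs(bs):
--         res = []
--         prev = None
--         run = 0
--         for x in bs:
--             run = run + 1 if prev is not None and prev >= x else 0
--             res.append(run)
--             prev = x
--         return res
--     left = runs(blocks)
--     right = runs(blocks[::-1])[::-1]
--     return max(l + r + 1 for l, r in zip(left, right))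
-- ===== Notes on version B (the rewrite author's own statement) =====
-- stated objective: faster
-- what changed: Replaces the per-index recursive left/right run counting (quadratic) with two linear run-length passes (one on the list, one on its reverse) combined by a single zip/max.
import Mathlib
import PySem

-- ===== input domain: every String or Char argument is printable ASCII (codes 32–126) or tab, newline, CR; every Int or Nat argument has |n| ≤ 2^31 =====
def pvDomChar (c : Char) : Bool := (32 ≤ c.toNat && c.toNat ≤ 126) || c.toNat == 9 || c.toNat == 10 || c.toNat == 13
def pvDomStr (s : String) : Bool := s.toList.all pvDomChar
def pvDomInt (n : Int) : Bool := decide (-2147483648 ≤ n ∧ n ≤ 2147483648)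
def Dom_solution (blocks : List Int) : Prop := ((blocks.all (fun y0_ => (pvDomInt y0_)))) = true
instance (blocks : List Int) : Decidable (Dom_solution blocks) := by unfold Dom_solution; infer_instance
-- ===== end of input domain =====

-- B replaces A's per-index recursive left/right run counting (quadratic) with two
-- linear run-length passes (forward, and on the reversed list) combined by one zip/max.


-- ===== PORT A =====
-- count_left(i, blocks): walks left while blocks[i-1] >= blocks[i] (all indexing in range,
-- so List.getD is exact)
def countLeftA : Nat → List Int → Int
  | 0, _ => 0
  | i + 1, blocks =>
      if blocks.getD i 0 ≥ blocks.getD (i + 1) 0 then 1 + countLeftA i blocks else 0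

-- count_right(i, blocks): walks right while blocks[i+1] >= blocks[i]
def countRightA (i : Nat) (blocks : List Int) : Int :=
  if h : i + 1 ≤ blocks.length - 1 then
    if blocks.getD (i + 1) 0 ≥ blocks.getD i 0 then 1 + countRightA (i + 1) blocks else 0
  else 0
termination_by blocks.length - i
decreasing_by omega

-- solution(blocks): builds res over range(len(blocks)), returns max(res)
-- (Python max raises on []; Pre_solution excludes that, .getD 0 is never used under it)
def solution (blocks : List Int) : Int :=
  let res := (List.range blocks.length).map (fun i =>
    if i = 0 then 1 + countRightA i blocks
    else if i = blocks.length - 1 then 1 + countLeftA i blocks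
    else 1 + countLeftA i blocks + countRightA i blocks)
  (PySem.List.max? res (fun x => x)).getD 0

-- ===== PORT B =====
-- runs(bs): one pass, carrying the previous element and the current run length
def runsB : Option Int → Int → List Int → List Int
  | _, _, [] => []
  | prev, run, x :: xs =>
      let r : Int := match prev with
        | some p => if p ≥ x then run + 1 else 0
        | none => 0
      r :: runsB (some x) r xs

def solution_alt (blocks : List Int) : Int :=
  let left := runsB none 0 blocks
  let right := (runsB none 0 blocks.reverse).reverse
  (PySem.List.max? (List.zipWith (fun l r => l + r + 1) left right) (fun x => x)).getD 0

-- ===== PRECONDITION & SPEC =====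
-- Python's max() raises ValueError on an empty sequence (in both A and B)
def Pre_solution (blocks : List Int) : Prop := blocks ≠ []
instance (blocks : List Int) : Decidable (Pre_solution blocks) := by unfold Pre_solution; infer_instance
def pvWitness_solution : List Int := [2, 6, 8, 5]

def Spec_solution (blocks : List Int) (out : Int) : Prop := out = solution_alt blocks
instance (blocks : List Int) (out : Int) : Decidable (Spec_solution blocks out) := by unfold Spec_solution; infer_instance

-- ===== CLAIM (what is proved, stated in full; the proofs are below) =====
def Claim_equal_solution : Prop := ∀ (blocks : List Int), Dom_solution blocks → Pre_solution blocks → Spec_solution blocks (solution blocks)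

-- ===== LEMMAS AND PROOFS =====

-- runsB, continued from position k: the tail of the forward pass computes countLeftA
theorem runsB_main (b : List Int) (k : Nat) (hk : k < b.length) :
    runsB (some (b.getD k 0)) (countLeftA k b) (b.drop (k + 1)) =
      (List.range (b.length - (k + 1))).map (fun j => countLeftA (k + 1 + j) b) := by
  induction hn : b.length - (k + 1) generalizing k with
  | zero =>
      have : b.drop (k + 1) = [] := List.drop_eq_nil_of_le (by omega)
      simp [this, runsB]
  | succ n ih =>
      have hk1 : k + 1 < b.length := by omega
      rw [List.drop_eq_getElem_cons hk1]
      show (if b.getD k 0 ≥ b[k + 1] then countLeftA k b + 1 else 0) ::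
            runsB (some b[k + 1])
              (if b.getD k 0 ≥ b[k + 1] then countLeftA k b + 1 else 0)
              (b.drop (k + 2)) = _
      have hget : b.getD (k + 1) 0 = b[k + 1] := List.getD_eq_getElem b 0 hk1
      have hr : (if b.getD k 0 ≥ b[k + 1] then countLeftA k b + 1 else 0)
          = countLeftA (k + 1) b := by
        rw [countLeftA, hget]; split_ifs <;> ring
      rw [hr, ← hget]
      have := ih (k + 1) hk1 (by omega)
      rw [this, List.range_succ_eq_map, List.map_cons, List.map_map]
      refine congrArg₂ _ (by norm_num) ?_
      apply List.map_congr_left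
      intro j _
      show countLeftA (k + 1 + 1 + j) b = countLeftA (k + 1 + (j + 1)) b
      congr 1
      omega

theorem runsB_eq (b : List Int) :
    runsB none 0 b = (List.range b.length).map (fun i => countLeftA i b) := by
  cases b with
  | nil => rfl
  | cons x xs =>
      have h0 : (0 : Nat) < (x :: xs).length := by simp
      have hm := runsB_main (x :: xs) 0 h0
      simp only [List.getD_cons_zero, List.drop_succ_cons, List.drop_zero] at hm
      show (0 : Int) :: runsB (some x) 0 xs = _
      have hc : countLeftA 0 (x :: xs) = 0 := rfl
      rw [hc] at hm
      rw [hm]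
      have : (x :: xs).length = xs.length + 1 := rfl
      rw [this, List.range_succ_eq_map, List.map_cons, List.map_map]
      refine congrArg₂ _ rfl ?_
      apply List.map_congr_left
      intro j _
      show countLeftA (0 + 1 + j) (x :: xs) = countLeftA (j + 1) (x :: xs)
      congr 1
      omega

theorem getD_reverse (b : List Int) (k : Nat) (hk : k < b.length) :
    b.reverse.getD k 0 = b.getD (b.length - 1 - k) 0 := by
  have h1 : k < b.reverse.length := by simpa using hk
  have h2 : b.length - 1 - k < b.length := by omega
  rw [List.getD_eq_getElem _ 0 h1, List.getD_eq_getElem _ 0 h2, List.getElem_reverse]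

theorem countRightA_eq (b : List Int) (i : Nat) (hi : i < b.length) :
    countLeftA (b.length - 1 - i) b.reverse = countRightA i b := by
  induction hn : b.length - (i + 1) generalizing i with
  | zero =>
      have hii : i = b.length - 1 := by omega
      have : b.length - 1 - i = 0 := by omega
      rw [this]
      rw [countRightA]
      rw [dif_neg (by omega)]
      rfl
  | succ n ih =>
      have h1 : i + 1 < b.length := by omega
      have hm : b.length - 1 - i = (b.length - 1 - (i + 1)) + 1 := by omega
      rw [hm, countLeftA]
      have e1 : b.reverse.getD (b.length - 1 - (i + 1)) 0 = b.getD (i + 1) 0 := by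
        rw [getD_reverse b _ (by omega)]; congr 1; omega
      have e2 : b.reverse.getD (b.length - 1 - (i + 1) + 1) 0 = b.getD i 0 := by
        rw [getD_reverse b _ (by omega)]; congr 1; omega
      rw [e1, e2, ih (i + 1) h1 (by omega)]
      conv_rhs => rw [countRightA]
      rw [dif_pos (by omega)]

theorem rev_map_range (f : Nat → Int) (n : Nat) :
    ((List.range n).map f).reverse = (List.range n).map (fun i => f (n - 1 - i)) := by
  apply List.ext_getElem
  · simp
  · intro i h1 h2
    rw [List.getElem_reverse]
    simp only [List.length_map, List.length_range, List.getElem_map, List.getElem_range]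

theorem zip_maps (f g : Nat → Int) (l : List Nat) :
    List.zipWith (fun x y => x + y + 1) (l.map f) (l.map g)
      = l.map (fun i => f i + g i + 1) := by
  induction l with
  | nil => rfl
  | cons x xs ih => simp [ih]

theorem res_lists_eq (b : List Int) :
    (List.range b.length).map (fun i =>
        if i = 0 then 1 + countRightA i b
        else if i = b.length - 1 then 1 + countLeftA i b
        else 1 + countLeftA i b + countRightA i b)
      = List.zipWith (fun l r => l + r + 1) (runsB none 0 b)
          ((runsB none 0 b.reverse).reverse) := by
  have hright : (runsB none 0 b.reverse).reverse
      = (List.range b.length).map (fun i => countRightA i b) := by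
    rw [runsB_eq, List.length_reverse, rev_map_range]
    apply List.map_congr_left
    intro i hi
    exact countRightA_eq b i (List.mem_range.mp hi)
  rw [runsB_eq, hright, zip_maps]
  apply List.map_congr_left
  intro i hi
  have hi' : i < b.length := List.mem_range.mp hi
  by_cases h0 : i = 0
  · subst h0
    have : countLeftA 0 b = 0 := rfl
    simp [this]
    ring
  · rw [if_neg h0]
    by_cases hl : i = b.length - 1
    · rw [if_pos hl]
      have hr0 : countRightA i b = 0 := by
        rw [countRightA, dif_neg (by omega)]
      rw [hr0]; ring
    · rw [if_neg hl]; ring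

theorem solution_spec : Claim_equal_solution := by
  intro blocks _ _
  unfold Spec_solution solution solution_alt
  rw [res_lists_eq]
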